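-- pv_equiv track=rewrite | github.com/liupengsay/PyIsTheBestLang | src/basis/hash/problem.py | lc_2143
-- ===== SOURCE A (Python) =====
-- from collections import defaultdict, Counter
-- from typing import List
--
-- def lc_2143(nums1: List[int], nums2: List[int]) -> int:
--     """
--     url: https://leetcode.cn/problems/choose-numbers-from-two-arrays-in-range/
--     tag: prefix_sum|hash|counter|classical|linear_dp
--     """
--     n = len(nums1)
--     mod = 10 ** 9 + 7
--     pre = defaultdict(int)
--     pre[-nums1[0]] += 1
--     pre[nums2[0]] += 1
--     ans = pre[0]
--     for i in range(1, n):
--         cur = defaultdict(int)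
--         cur[-nums1[i]] += 1
--         cur[nums2[i]] += 1
--         for p in pre:
--             cur[p - nums1[i]] += pre[p]
--             cur[p + nums2[i]] += pre[p]
--         ans += cur[0]
--         ans %= mod
--         pre = cur
--     return ans
-- ===== SOURCE B (Python) =====
-- def lc_2143(nums1, nums2):
--     mod = 10 ** 9 + 7
--     n = len(nums1)
--     ans = 0
--     for l in range(n):
--         dp = {0: 1}
--         for r in range(l, n):
--             ndp = {}
--             for p, c in dp.items():
--                 k1 = p - nums1[r]
--                 ndp[k1] = ndp.get(k1, 0) + c
--                 k2 = p + nums2[r]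
--                 ndp[k2] = ndp.get(k2, 0) + c
--             dp = ndp
--             ans = (ans + dp.get(0, 0)) % mod
--     return ans
-- ===== Notes on version B (the rewrite author's own statement) =====
-- stated objective: alternative
-- what changed: Replaces the single rolling balance-distribution pass (one defaultdict accumulated across the whole array, seeded with singleton selections at every index) by a per-start nested double loop: for each start l a fresh distribution {0:1} is shifted across r=l..n-1 and dp[0] is accumulated mod 1e9+7.
import Mathlib
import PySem

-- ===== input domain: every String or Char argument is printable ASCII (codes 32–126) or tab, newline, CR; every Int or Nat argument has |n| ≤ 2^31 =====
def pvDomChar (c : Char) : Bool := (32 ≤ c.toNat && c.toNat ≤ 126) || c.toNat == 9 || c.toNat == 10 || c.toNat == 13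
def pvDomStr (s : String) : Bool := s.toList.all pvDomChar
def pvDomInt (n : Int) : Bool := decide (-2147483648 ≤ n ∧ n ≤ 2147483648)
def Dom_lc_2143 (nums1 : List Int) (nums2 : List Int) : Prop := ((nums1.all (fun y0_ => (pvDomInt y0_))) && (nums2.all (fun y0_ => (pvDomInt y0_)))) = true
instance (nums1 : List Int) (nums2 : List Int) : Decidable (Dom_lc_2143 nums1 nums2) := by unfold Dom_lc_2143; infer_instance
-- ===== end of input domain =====

-- B replaces A's single rolling balance-distribution pass by an independent per-start-index
-- nested double loop (objective: alternative decomposition, not faster).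

-- ===== PORT A =====
-- defaultdict 'd[k] += v': read d[k] (getD, default 0), write back the sum (insert).
def pvBumpA (d : PySem.Dict Int Int) (k v : Int) : PySem.Dict Int Int :=
  d.insert k (d.getD k 0 + v)

def lc_2143 (nums1 : List Int) (nums2 : List Int) : Int :=
  let n : Int := nums1.length
  let md : Int := 10 ^ 9 + 7
  let pre := pvBumpA PySem.Dict.empty (-((PySem.List.pyGet? nums1 0).getD 0)) 1
  let pre := pvBumpA pre ((PySem.List.pyGet? nums2 0).getD 0) 1
  let ans := pre.getD 0 0
  let pre := pre.insert 0 ans          -- defaultdict read 'pre[0]' inserts the key 0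
  let res := (PySem.List.pyRange 1 n 1).foldl (fun (st : Int × PySem.Dict Int Int) i =>
      let ai := (PySem.List.pyGet? nums1 i).getD 0
      let bi := (PySem.List.pyGet? nums2 i).getD 0
      let cur := pvBumpA PySem.Dict.empty (-ai) 1
      let cur := pvBumpA cur bi 1
      let cur := st.2.keys.foldl (fun c p =>
          pvBumpA (pvBumpA c (p - ai) (st.2.getD p 0)) (p + bi) (st.2.getD p 0)) cur
      let c0 := cur.getD 0 0
      let cur := cur.insert 0 c0       -- defaultdict read 'cur[0]' inserts the key 0
      ((st.1 + c0) % md, cur)) (ans, pre)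
  res.1

-- ===== PORT B =====
def lc_2143_alt (nums1 : List Int) (nums2 : List Int) : Int :=
  let md : Int := 10 ^ 9 + 7
  let n : Int := nums1.length
  (PySem.List.pyRange 0 n 1).foldl (fun ans l =>
    let dp0 : PySem.Dict Int Int := PySem.Dict.empty.insert 0 1
    let res := (PySem.List.pyRange l n 1).foldl (fun (st : Int × PySem.Dict Int Int) r =>
        let ar := (PySem.List.pyGet? nums1 r).getD 0
        let br := (PySem.List.pyGet? nums2 r).getD 0
        let ndp := st.2.items.foldl (fun nd (pc : Int × Int) =>
            let k1 := pc.1 - ar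
            let nd := nd.insert k1 (nd.getD k1 0 + pc.2)
            let k2 := pc.1 + br
            nd.insert k2 (nd.getD k2 0 + pc.2)) PySem.Dict.empty
        ((st.1 + ndp.getD 0 0) % md, ndp)) (ans, dp0)
    res.1) 0

-- ===== PRECONDITION & SPEC =====
-- Pre_ excludes exactly the inputs on which the Python A raises IndexError:
-- empty nums1 (nums1[0]) and nums2 shorter than nums1 (nums2[i] for i < len(nums1)).
def Pre_lc_2143 (nums1 : List Int) (nums2 : List Int) : Prop :=
  nums1 ≠ [] ∧ nums1.length ≤ nums2.length
instance (nums1 : List Int) (nums2 : List Int) : Decidable (Pre_lc_2143 nums1 nums2) := by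
  unfold Pre_lc_2143; infer_instance

def pvWitness_lc_2143 : List Int × List Int := ([1, 2, 1], [2, 1, 1])


def Spec_lc_2143 (nums1 : List Int) (nums2 : List Int) (out : Int) : Prop := out = lc_2143_alt nums1 nums2
instance (nums1 : List Int) (nums2 : List Int) (out : Int) : Decidable (Spec_lc_2143 nums1 nums2 out) := by unfold Spec_lc_2143; infer_instance

-- ===== CLAIM (what is proved, stated in full; the proofs are below) =====
def Claim_equal_lc_2143 : Prop := ∀ (nums1 : List Int) (nums2 : List Int), Dom_lc_2143 nums1 nums2 → Pre_lc_2143 nums1 nums2 → Spec_lc_2143 nums1 nums2 (lc_2143 nums1 nums2)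

-- ===== LEMMAS AND PROOFS =====

-- value of nums at index i, exactly as both ports read it
def pvVal (nums : List Int) (i : Int) : Int := (PySem.List.pyGet? nums i).getD 0

-- the modulus
def pvM : Int := 10 ^ 9 + 7

-- A's balance distribution after processing index i (value function of 'pre')
def pvG (nums1 nums2 : List Int) : Nat → Int → Int
  | 0, x => (if x = -(pvVal nums1 0) then 1 else 0) + (if x = pvVal nums2 0 then 1 else 0)
  | (i+1), x =>
      (if x = -(pvVal nums1 (i+1)) then 1 else 0) + (if x = pvVal nums2 (i+1) then 1 else 0)
      + pvG nums1 nums2 i (x + pvVal nums1 (i+1)) + pvG nums1 nums2 i (x - pvVal nums2 (i+1))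

-- B's balance distribution for start l after m shift steps (value function of 'dp')
def pvD (nums1 nums2 : List Int) (l : Int) : Nat → Int → Int
  | 0, x => if x = 0 then 1 else 0
  | (m+1), x => pvD nums1 nums2 l m (x + pvVal nums1 (l + m)) + pvD nums1 nums2 l m (x - pvVal nums2 (l + m))

-- (getD after a defaultdict bump)
theorem pvBumpA_getD (d : PySem.Dict Int Int) (k v x : Int) :
    (pvBumpA d k v).getD x 0 = d.getD x 0 + (if x = k then v else 0) := by
  unfold pvBumpA
  rw [PySem.Dict.getD_insert]
  split_ifs with h <;> simp [h]

theorem pvBumpA_nodup (d : PySem.Dict Int Int) (k v : Int) (h : d.keys.Nodup) :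
    (pvBumpA d k v).keys.Nodup := by
  unfold pvBumpA; exact PySem.Dict.nodup_keys_insert d k _ h

theorem getD_of_not_mem_keys (d : PySem.Dict Int Int) (x : Int) (h : x ∉ d.keys) :
    d.getD x 0 = 0 := by
  have hc : d.contains x = false := by
    by_contra hcc
    exact h ((PySem.Dict.contains_iff_mem_keys d x).1 (by simpa using hcc))
  have : d.get? x = none := (PySem.Dict.get?_eq_none_iff_contains d x).2 hc
  show (d.get? x).getD 0 = 0
  rw [this]; rfl

theorem sum_map_ite_eq (w : Int → Int) (y : Int) :
    ∀ (ps : List Int), ps.Nodup →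
      (ps.map (fun p => if p = y then w p else 0)).sum = if y ∈ ps then w y else 0 := by
  intro ps
  induction ps with
  | nil => simp
  | cons p t ih =>
      intro hnd
      rcases List.nodup_cons.1 hnd with ⟨hp, ht⟩
      simp only [List.map_cons, List.sum_cons, ih ht, List.mem_cons]
      by_cases hpy : p = y
      · subst hpy; simp [hp]
      · simp [hpy, Ne.symm hpy]

-- ===== A-side loop characterisation =====

-- the inner 'for p in pre' fold, as a sum over the key list
theorem A_keys_fold (a b : Int) (d : PySem.Dict Int Int) :
    ∀ (ps : List Int) (c : PySem.Dict Int Int) (x : Int),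
      (ps.foldl (fun c p => pvBumpA (pvBumpA c (p - a) (d.getD p 0)) (p + b) (d.getD p 0)) c).getD x 0
        = c.getD x 0 + (ps.map (fun p =>
            (if p = x + a then d.getD p 0 else 0) + (if p = x - b then d.getD p 0 else 0))).sum := by
  intro ps
  induction ps with
  | nil => simp
  | cons p t ih =>
      intro c x
      simp only [List.foldl_cons, List.map_cons, List.sum_cons, ih]
      rw [pvBumpA_getD, pvBumpA_getD]
      have h1 : (if x = p - a then d.getD p 0 else 0) = (if p = x + a then d.getD p 0 else 0) := by
        split_ifs with u v v <;> first | rfl | omega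
      have h2 : (if x = p + b then d.getD p 0 else 0) = (if p = x - b then d.getD p 0 else 0) := by
        split_ifs with u v v <;> first | rfl | omega
      rw [h1, h2]; ring

theorem A_keys_fold_nodup (a b : Int) (d : PySem.Dict Int Int) :
    ∀ (ps : List Int) (c : PySem.Dict Int Int), c.keys.Nodup →
      (ps.foldl (fun c p => pvBumpA (pvBumpA c (p - a) (d.getD p 0)) (p + b) (d.getD p 0)) c).keys.Nodup := by
  intro ps
  induction ps with
  | nil => intro c h; simpa using h
  | cons p t ih =>
      intro c h
      exact ih _ (pvBumpA_nodup _ _ _ (pvBumpA_nodup _ _ _ h))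

-- one body step of A's loop, generic over the incoming value function f
theorem A_body_step (nums1 nums2 : List Int) (i : Int) (d : PySem.Dict Int Int)
    (hnd : d.keys.Nodup) (f : Int → Int) (hf : ∀ x, d.getD x 0 = f x) :
    ∀ x, ((d.keys.foldl (fun c p =>
        pvBumpA (pvBumpA c (p - pvVal nums1 i) (d.getD p 0)) (p + pvVal nums2 i) (d.getD p 0))
        (pvBumpA (pvBumpA PySem.Dict.empty (-(pvVal nums1 i)) 1) (pvVal nums2 i) 1))).getD x 0
      = (if x = -(pvVal nums1 i) then 1 else 0) + (if x = pvVal nums2 i then 1 else 0)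
        + f (x + pvVal nums1 i) + f (x - pvVal nums2 i) := by
  intro x
  rw [A_keys_fold]
  rw [pvBumpA_getD, pvBumpA_getD]
  have hsplit : (d.keys.map (fun p =>
      (if p = x + pvVal nums1 i then d.getD p 0 else 0)
      + (if p = x - pvVal nums2 i then d.getD p 0 else 0))).sum
      = (d.keys.map (fun p => if p = x + pvVal nums1 i then d.getD p 0 else 0)).sum
        + (d.keys.map (fun p => if p = x - pvVal nums2 i then d.getD p 0 else 0)).sum := by
    rw [← List.sum_map_add]
  rw [hsplit, sum_map_ite_eq _ _ _ hnd, sum_map_ite_eq _ _ _ hnd]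
  have e1 : (if x + pvVal nums1 i ∈ d.keys then d.getD (x + pvVal nums1 i) 0 else 0)
      = f (x + pvVal nums1 i) := by
    split_ifs with h
    · exact hf _
    · rw [← hf]; exact (getD_of_not_mem_keys d _ h).symm
  have e2 : (if x - pvVal nums2 i ∈ d.keys then d.getD (x - pvVal nums2 i) 0 else 0)
      = f (x - pvVal nums2 i) := by
    split_ifs with h
    · exact hf _
    · rw [← hf]; exact (getD_of_not_mem_keys d _ h).symm
  rw [e1, e2]
  simp [PySem.Dict.getD_empty]
  ring

-- A's accumulated answer after m loop iterations
def pvAnsA (nums1 nums2 : List Int) : Nat → Int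
  | 0 => pvG nums1 nums2 0 0
  | (m+1) => (pvAnsA nums1 nums2 m + pvG nums1 nums2 (m+1) 0) % pvM

-- full characterisation of A's fold state
theorem A_loop (nums1 nums2 : List Int) :
    ∀ (m : Nat) (ans0 : Int) (d0 : PySem.Dict Int Int),
      d0.keys.Nodup → (∀ x, d0.getD x 0 = pvG nums1 nums2 0 x) → ans0 = pvAnsA nums1 nums2 0 →
      (let st := (PySem.List.pyRange 1 (1 + (m : Int)) 1).foldl (fun (st : Int × PySem.Dict Int Int) i =>
          let ai := (PySem.List.pyGet? nums1 i).getD 0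
          let bi := (PySem.List.pyGet? nums2 i).getD 0
          let cur := pvBumpA PySem.Dict.empty (-ai) 1
          let cur := pvBumpA cur bi 1
          let cur := st.2.keys.foldl (fun c p =>
              pvBumpA (pvBumpA c (p - ai) (st.2.getD p 0)) (p + bi) (st.2.getD p 0)) cur
          let c0 := cur.getD 0 0
          let cur := cur.insert 0 c0
          ((st.1 + c0) % (10 ^ 9 + 7), cur)) (ans0, d0)
       st.1 = pvAnsA nums1 nums2 m ∧ st.2.keys.Nodup ∧ ∀ x, st.2.getD x 0 = pvG nums1 nums2 m x) := by
  intro m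
  induction m with
  | zero =>
      intro ans0 d0 hnd hvals hans
      rw [show (1 + ((0 : Nat) : Int)) = 1 by norm_num, PySem.List.pyRange_one_eq_nil (le_refl 1)]
      exact ⟨hans, hnd, hvals⟩
  | succ m ih =>
      intro ans0 d0 hnd hvals hans
      have hcast : (1 + ((m + 1 : Nat) : Int)) = (1 + (m : Int)) + 1 := by push_cast; ring
      rw [hcast, PySem.List.pyRange_one_succ_right (by omega), List.foldl_append]
      obtain ⟨h1, h2, h3⟩ := ih ans0 d0 hnd hvals hans
      set st := (PySem.List.pyRange 1 (1 + (m : Int)) 1).foldl (fun (st : Int × PySem.Dict Int Int) i =>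
          let ai := (PySem.List.pyGet? nums1 i).getD 0
          let bi := (PySem.List.pyGet? nums2 i).getD 0
          let cur := pvBumpA PySem.Dict.empty (-ai) 1
          let cur := pvBumpA cur bi 1
          let cur := st.2.keys.foldl (fun c p =>
              pvBumpA (pvBumpA c (p - ai) (st.2.getD p 0)) (p + bi) (st.2.getD p 0)) cur
          let c0 := cur.getD 0 0
          let cur := cur.insert 0 c0
          ((st.1 + c0) % (10 ^ 9 + 7), cur)) (ans0, d0) with hst
      simp only [List.foldl_cons, List.foldl_nil]
      simp only [show ∀ i : Int, (PySem.List.pyGet? nums1 i).getD 0 = pvVal nums1 i from fun _ => rfl,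
        show ∀ i : Int, (PySem.List.pyGet? nums2 i).getD 0 = pvVal nums2 i from fun _ => rfl]
      have hidx : (1 + (m : Int)) = ((m : Int) + 1) := by ring
      have hcur := A_body_step nums1 nums2 (1 + (m : Int)) st.2 h2 (pvG nums1 nums2 m) h3
      have hGv : ∀ x, (st.2.keys.foldl (fun c p =>
          pvBumpA (pvBumpA c (p - pvVal nums1 (1 + (m : Int))) (st.2.getD p 0))
            (p + pvVal nums2 (1 + (m : Int))) (st.2.getD p 0))
          (pvBumpA (pvBumpA PySem.Dict.empty (-(pvVal nums1 (1 + (m : Int)))) 1)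
            (pvVal nums2 (1 + (m : Int))) 1)).getD x 0 = pvG nums1 nums2 (m + 1) x := by
        intro x
        rw [hcur x, hidx]
        rfl
      refine ⟨?_, ?_, ?_⟩
      · show (st.1 + _) % (10 ^ 9 + 7) = pvAnsA nums1 nums2 (m + 1)
        rw [h1]
        show (pvAnsA nums1 nums2 m + _) % (10 ^ 9 + 7) = (pvAnsA nums1 nums2 m + pvG nums1 nums2 (m+1) 0) % pvM
        rw [hGv 0]; rfl
      · show (PySem.Dict.insert _ 0 _).keys.Nodup
        apply PySem.Dict.nodup_keys_insert
        exact A_keys_fold_nodup _ _ _ _ _ (pvBumpA_nodup _ _ _ (pvBumpA_nodup _ _ _ (PySem.Dict.nodup_keys_empty)))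
      · intro x
        show (PySem.Dict.insert _ 0 _).getD x 0 = _
        rw [PySem.Dict.getD_insert]
        split_ifs with h0
        · rw [h0]; exact hGv 0
        · exact hGv x

-- ===== bridge: A's distribution is the sum of B's per-start distributions =====

theorem G_eq_sum_D (nums1 nums2 : List Int) :
    ∀ (i : Nat) (x : Int),
      pvG nums1 nums2 i x = ∑ l ∈ Finset.range (i+1), pvD nums1 nums2 (l : Int) (i - l + 1) x := by
  intro i
  induction i with
  | zero =>
      intro x
      rw [Finset.sum_range_one]
      show pvG nums1 nums2 0 x = pvD nums1 nums2 ((0 : Nat) : Int) 1 x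
      simp only [pvG, pvD, Nat.cast_zero, add_zero]
      split_ifs <;> omega
  | succ i ih =>
      intro x
      have hG : pvG nums1 nums2 (i+1) x
          = ((if x = -(pvVal nums1 ((i : Int)+1)) then 1 else 0) + (if x = pvVal nums2 ((i : Int)+1) then 1 else 0))
            + (pvG nums1 nums2 i (x + pvVal nums1 ((i : Int)+1)) + pvG nums1 nums2 i (x - pvVal nums2 ((i : Int)+1))) := by
        show pvG nums1 nums2 (i+1) x = _
        simp only [pvG]
        ring
      rw [hG, ih, ih, ← Finset.sum_add_distrib]
      have key : ∀ l ∈ Finset.range (i+1),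
          pvD nums1 nums2 (l : Int) (i - l + 1) (x + pvVal nums1 ((i : Int)+1))
            + pvD nums1 nums2 (l : Int) (i - l + 1) (x - pvVal nums2 ((i : Int)+1))
          = pvD nums1 nums2 (l : Int) ((i - l + 1) + 1) x := by
        intro l hl
        have hl' : l ≤ i := Nat.lt_succ_iff.1 (Finset.mem_range.1 hl)
        have hidx : (l : Int) + ((i - l + 1 : Nat) : Int) = (i : Int) + 1 := by
          have : ((i - l : Nat) : Int) = (i : Int) - (l : Int) := by
            exact_mod_cast Int.ofNat_sub hl'
          push_cast [this]; ring
        show _ = pvD nums1 nums2 (l : Int) ((i - l + 1) + 1) x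
        rw [show pvD nums1 nums2 (l : Int) ((i - l + 1) + 1) x
            = pvD nums1 nums2 (l : Int) (i - l + 1) (x + pvVal nums1 ((l : Int) + ((i - l + 1 : Nat) : Int)))
              + pvD nums1 nums2 (l : Int) (i - l + 1) (x - pvVal nums2 ((l : Int) + ((i - l + 1 : Nat) : Int))) from rfl]
        rw [hidx]
      rw [Finset.sum_congr rfl key]
      conv_rhs => rw [Finset.sum_range_succ]
      have hlast : pvD nums1 nums2 ((i+1 : Nat) : Int) ((i + 1) - (i + 1) + 1) x
          = (if x = -(pvVal nums1 ((i : Int)+1)) then 1 else 0) + (if x = pvVal nums2 ((i : Int)+1) then 1 else 0) := by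
        rw [show (i + 1) - (i + 1) + 1 = 1 by omega]
        rw [show pvD nums1 nums2 ((i+1 : Nat) : Int) 1 x
            = pvD nums1 nums2 ((i+1 : Nat) : Int) 0 (x + pvVal nums1 (((i+1 : Nat) : Int) + ((0 : Nat) : Int)))
              + pvD nums1 nums2 ((i+1 : Nat) : Int) 0 (x - pvVal nums2 (((i+1 : Nat) : Int) + ((0 : Nat) : Int))) from rfl]
        rw [show (((i+1 : Nat) : Int) + ((0 : Nat) : Int)) = (i : Int) + 1 by push_cast; ring]
        simp only [pvD]
        split_ifs <;> omega
      have hcong : ∀ l ∈ Finset.range (i+1),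
          pvD nums1 nums2 (l : Int) ((i + 1) - l + 1) x = pvD nums1 nums2 (l : Int) ((i - l + 1) + 1) x := by
        intro l hl
        have : l ≤ i := Nat.lt_succ_iff.1 (Finset.mem_range.1 hl)
        congr 1
        omega
      rw [Finset.sum_congr rfl hcong, hlast]
      ring

-- ===== B-side loop characterisation =====

theorem B_items_fold (a b : Int) :
    ∀ (its : List (Int × Int)) (c : PySem.Dict Int Int) (x : Int),
      (its.foldl (fun nd (pc : Int × Int) =>
          (nd.insert (pc.1 - a) (nd.getD (pc.1 - a) 0 + pc.2)).insert (pc.1 + b)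
            ((nd.insert (pc.1 - a) (nd.getD (pc.1 - a) 0 + pc.2)).getD (pc.1 + b) 0 + pc.2)) c).getD x 0
        = c.getD x 0 + (its.map (fun pc =>
            (if pc.1 = x + a then pc.2 else 0) + (if pc.1 = x - b then pc.2 else 0))).sum := by
  intro its
  induction its with
  | nil => simp
  | cons pc t ih =>
      intro c x
      simp only [List.foldl_cons, List.map_cons, List.sum_cons]
      rw [ih]
      rw [show (c.insert (pc.1 - a) (c.getD (pc.1 - a) 0 + pc.2)).insert (pc.1 + b)
            ((c.insert (pc.1 - a) (c.getD (pc.1 - a) 0 + pc.2)).getD (pc.1 + b) 0 + pc.2)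
          = pvBumpA (pvBumpA c (pc.1 - a) pc.2) (pc.1 + b) pc.2 from rfl]
      rw [pvBumpA_getD, pvBumpA_getD]
      have h1 : (if x = pc.1 - a then pc.2 else 0) = (if pc.1 = x + a then pc.2 else 0) := by
        split_ifs with u v v <;> first | rfl | omega
      have h2 : (if x = pc.1 + b then pc.2 else 0) = (if pc.1 = x - b then pc.2 else 0) := by
        split_ifs with u v v <;> first | rfl | omega
      rw [h1, h2]; ring

theorem B_items_fold_nodup (a b : Int) :
    ∀ (its : List (Int × Int)) (c : PySem.Dict Int Int), c.keys.Nodup →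
      (its.foldl (fun nd (pc : Int × Int) =>
          (nd.insert (pc.1 - a) (nd.getD (pc.1 - a) 0 + pc.2)).insert (pc.1 + b)
            ((nd.insert (pc.1 - a) (nd.getD (pc.1 - a) 0 + pc.2)).getD (pc.1 + b) 0 + pc.2)) c).keys.Nodup := by
  intro its
  induction its with
  | nil => intro c h; simpa using h
  | cons pc t ih =>
      intro c h
      exact ih _ (PySem.Dict.nodup_keys_insert _ _ _ (PySem.Dict.nodup_keys_insert _ _ _ h))

theorem sum_items_ite (d : PySem.Dict Int Int) (hnd : d.keys.Nodup) (y : Int) :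
    (d.items.map (fun pc : Int × Int => if pc.1 = y then pc.2 else 0)).sum = d.getD y 0 := by
  rw [PySem.Dict.items_eq_map_keys d hnd 0, List.map_map]
  rw [show ((fun pc : Int × Int => if pc.1 = y then pc.2 else 0) ∘ (fun k => (k, d.getD k 0)))
      = (fun k => if k = y then d.getD k 0 else 0) from rfl]
  rw [sum_map_ite_eq _ _ _ hnd]
  split_ifs with h
  · rfl
  · exact (getD_of_not_mem_keys d y h).symm

-- one body step of B's inner loop, generic over the incoming value function f
theorem B_body_step (a b : Int) (d : PySem.Dict Int Int)
    (hnd : d.keys.Nodup) (f : Int → Int) (hf : ∀ x, d.getD x 0 = f x) :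
    ∀ x, (d.items.foldl (fun nd (pc : Int × Int) =>
          (nd.insert (pc.1 - a) (nd.getD (pc.1 - a) 0 + pc.2)).insert (pc.1 + b)
            ((nd.insert (pc.1 - a) (nd.getD (pc.1 - a) 0 + pc.2)).getD (pc.1 + b) 0 + pc.2))
          PySem.Dict.empty).getD x 0 = f (x + a) + f (x - b) := by
  intro x
  rw [B_items_fold]
  have hsplit : (d.items.map (fun pc : Int × Int =>
      (if pc.1 = x + a then pc.2 else 0) + (if pc.1 = x - b then pc.2 else 0))).sum
      = (d.items.map (fun pc : Int × Int => if pc.1 = x + a then pc.2 else 0)).sum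
        + (d.items.map (fun pc : Int × Int => if pc.1 = x - b then pc.2 else 0)).sum := by
    rw [← List.sum_map_add]
  rw [hsplit, sum_items_ite d hnd, sum_items_ite d hnd, hf, hf]
  simp [PySem.Dict.getD_empty]

-- B's accumulated inner answer after m steps from a0
def pvAnsB (nums1 nums2 : List Int) (l a0 : Int) : Nat → Int
  | 0 => a0
  | (m+1) => (pvAnsB nums1 nums2 l a0 m + pvD nums1 nums2 l (m+1) 0) % pvM

-- full characterisation of B's inner fold
theorem B_inner (nums1 nums2 : List Int) (l : Int) :
    ∀ (m : Nat) (a0 : Int) (d0 : PySem.Dict Int Int),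
      d0.keys.Nodup → (∀ x, d0.getD x 0 = pvD nums1 nums2 l 0 x) →
      (let st := (PySem.List.pyRange l (l + (m : Int)) 1).foldl (fun (st : Int × PySem.Dict Int Int) r =>
          let ar := (PySem.List.pyGet? nums1 r).getD 0
          let br := (PySem.List.pyGet? nums2 r).getD 0
          let ndp := st.2.items.foldl (fun nd (pc : Int × Int) =>
              let k1 := pc.1 - ar
              let nd := nd.insert k1 (nd.getD k1 0 + pc.2)
              let k2 := pc.1 + br
              nd.insert k2 (nd.getD k2 0 + pc.2)) PySem.Dict.empty
          ((st.1 + ndp.getD 0 0) % (10 ^ 9 + 7), ndp)) (a0, d0)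
       st.1 = pvAnsB nums1 nums2 l a0 m ∧ st.2.keys.Nodup ∧ ∀ x, st.2.getD x 0 = pvD nums1 nums2 l m x) := by
  intro m
  induction m with
  | zero =>
      intro a0 d0 hnd hvals
      rw [show (l + ((0 : Nat) : Int)) = l by norm_num, PySem.List.pyRange_one_eq_nil (le_refl l)]
      exact ⟨rfl, hnd, hvals⟩
  | succ m ih =>
      intro a0 d0 hnd hvals
      have hcast : (l + ((m + 1 : Nat) : Int)) = (l + (m : Int)) + 1 := by push_cast; ring
      rw [hcast, PySem.List.pyRange_one_succ_right (by omega), List.foldl_append]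
      obtain ⟨h1, h2, h3⟩ := ih a0 d0 hnd hvals
      set st := (PySem.List.pyRange l (l + (m : Int)) 1).foldl (fun (st : Int × PySem.Dict Int Int) r =>
          let ar := (PySem.List.pyGet? nums1 r).getD 0
          let br := (PySem.List.pyGet? nums2 r).getD 0
          let ndp := st.2.items.foldl (fun nd (pc : Int × Int) =>
              let k1 := pc.1 - ar
              let nd := nd.insert k1 (nd.getD k1 0 + pc.2)
              let k2 := pc.1 + br
              nd.insert k2 (nd.getD k2 0 + pc.2)) PySem.Dict.empty
          ((st.1 + ndp.getD 0 0) % (10 ^ 9 + 7), ndp)) (a0, d0) with hst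
      simp only [List.foldl_cons, List.foldl_nil]
      simp only [show ∀ i : Int, (PySem.List.pyGet? nums1 i).getD 0 = pvVal nums1 i from fun _ => rfl,
        show ∀ i : Int, (PySem.List.pyGet? nums2 i).getD 0 = pvVal nums2 i from fun _ => rfl]
      have hvals2 : ∀ x, (st.2.items.foldl (fun nd (pc : Int × Int) =>
          (nd.insert (pc.1 - pvVal nums1 (l + (m : Int))) (nd.getD (pc.1 - pvVal nums1 (l + (m : Int))) 0 + pc.2)).insert
            (pc.1 + pvVal nums2 (l + (m : Int)))
            ((nd.insert (pc.1 - pvVal nums1 (l + (m : Int))) (nd.getD (pc.1 - pvVal nums1 (l + (m : Int))) 0 + pc.2)).getD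
              (pc.1 + pvVal nums2 (l + (m : Int))) 0 + pc.2)) PySem.Dict.empty).getD x 0
          = pvD nums1 nums2 l (m + 1) x := by
        intro x
        rw [B_body_step _ _ _ h2 (pvD nums1 nums2 l m) h3 x]
        rfl
      refine ⟨?_, ?_, ?_⟩
      · show (st.1 + _) % (10 ^ 9 + 7) = pvAnsB nums1 nums2 l a0 (m + 1)
        rw [h1]
        show (pvAnsB nums1 nums2 l a0 m + _) % (10 ^ 9 + 7)
          = (pvAnsB nums1 nums2 l a0 m + pvD nums1 nums2 l (m+1) 0) % pvM
        rw [hvals2 0]; rfl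
      · exact B_items_fold_nodup _ _ _ _ (PySem.Dict.nodup_keys_empty)
      · exact hvals2

-- B's answer accumulation over one start l, and nonnegativity facts
theorem G_nonneg (nums1 nums2 : List Int) : ∀ (i : Nat) (x : Int), 0 ≤ pvG nums1 nums2 i x := by
  intro i
  induction i with
  | zero => intro x; unfold pvG; split_ifs <;> norm_num
  | succ m ih =>
      intro x; unfold pvG
      have := ih (x + pvVal nums1 (m+1)); have := ih (x - pvVal nums2 (m+1))
      split_ifs <;> omega

-- total of B's per-start contributions for starts below j (array length cap n)
def pvTot (nums1 nums2 : List Int) (n j : Nat) : Int :=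
  ∑ l ∈ Finset.range j, ∑ m ∈ Finset.range (n - l), pvD nums1 nums2 (l : Int) (m+1) 0

theorem pvAnsB_shift (nums1 nums2 : List Int) (l : Int) :
    ∀ (m : Nat) (a0 : Int), pvAnsB nums1 nums2 l a0 (m+1)
      = (a0 + ∑ k ∈ Finset.range (m+1), pvD nums1 nums2 l (k+1) 0) % pvM := by
  intro m
  induction m with
  | zero =>
      intro a0
      show (a0 + pvD nums1 nums2 l 1 0) % pvM = _
      rw [Finset.sum_range_one]
  | succ m ih =>
      intro a0
      show (pvAnsB nums1 nums2 l a0 (m+1) + pvD nums1 nums2 l (m+2) 0) % pvM = _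
      rw [ih, Int.emod_add_emod]
      conv_rhs => rw [Finset.sum_range_succ]
      congr 1
      ring

theorem d0_vals (nums1 nums2 : List Int) (l : Int) :
    ∀ x, (PySem.Dict.empty.insert (0:Int) (1:Int)).getD x 0 = pvD nums1 nums2 l 0 x := by
  intro x
  rw [PySem.Dict.getD_insert]
  simp only [pvD, PySem.Dict.getD_empty]

theorem B_outer (nums1 nums2 : List Int) :
    ∀ (j : Nat), j ≤ nums1.length →
      ((PySem.List.pyRange 0 (j : Int) 1).foldl (fun ans l =>
        ((PySem.List.pyRange l (nums1.length : Int) 1).foldl (fun (st : Int × PySem.Dict Int Int) r =>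
            let ar := (PySem.List.pyGet? nums1 r).getD 0
            let br := (PySem.List.pyGet? nums2 r).getD 0
            let ndp := st.2.items.foldl (fun nd (pc : Int × Int) =>
                let k1 := pc.1 - ar
                let nd := nd.insert k1 (nd.getD k1 0 + pc.2)
                let k2 := pc.1 + br
                nd.insert k2 (nd.getD k2 0 + pc.2)) PySem.Dict.empty
            ((st.1 + ndp.getD 0 0) % (10 ^ 9 + 7), ndp)) (ans, PySem.Dict.empty.insert 0 1)).1) 0)
      = pvTot nums1 nums2 nums1.length j % pvM := by
  intro j
  induction j with
  | zero =>
      rw [Nat.cast_zero, PySem.List.pyRange_one_eq_nil (le_refl 0)]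
      intro _
      simp [pvTot, pvM]
  | succ j ih =>
      intro hj
      have hj' : j ≤ nums1.length := by omega
      rw [show ((j+1 : Nat) : Int) = (j : Int) + 1 from by push_cast; ring]
      rw [PySem.List.pyRange_one_succ_right (Int.natCast_nonneg j), List.foldl_append]
      rw [ih hj']
      simp only [List.foldl_cons, List.foldl_nil]
      rw [show ((nums1.length : Nat) : Int) = (j : Int) + ((nums1.length - j : Nat) : Int) from by omega]
      obtain ⟨h1, -, -⟩ := B_inner nums1 nums2 (j : Int) (nums1.length - j)
        (pvTot nums1 nums2 nums1.length j % pvM) (PySem.Dict.empty.insert 0 1)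
        (PySem.Dict.nodup_keys_insert _ _ _ PySem.Dict.nodup_keys_empty)
        (d0_vals nums1 nums2 (j : Int))
      rw [h1]
      rw [show nums1.length - j = (nums1.length - j - 1) + 1 from by omega]
      rw [pvAnsB_shift]
      rw [show (nums1.length - j - 1) + 1 = nums1.length - j from by omega]
      rw [Int.emod_add_emod]
      congr 1
      simp only [pvTot]
      rw [Finset.sum_range_succ]

theorem ansA_sum (nums1 nums2 : List Int) :
    ∀ m : Nat, pvAnsA nums1 nums2 m = (∑ i ∈ Finset.range (m+1), pvG nums1 nums2 i 0) % pvM := by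
  intro m
  induction m with
  | zero =>
      show pvG nums1 nums2 0 0 = _
      rw [Finset.sum_range_one]
      have h0 : 0 ≤ pvG nums1 nums2 0 0 := G_nonneg nums1 nums2 0 0
      have h2 : pvG nums1 nums2 0 0 < pvM := by
        have hle : pvG nums1 nums2 0 0 ≤ 2 := by
          simp only [pvG]; split_ifs <;> norm_num
        have : (2 : Int) < pvM := by norm_num [pvM]
        omega
      exact (Int.emod_eq_of_lt h0 h2).symm
  | succ m ih =>
      show (pvAnsA nums1 nums2 m + pvG nums1 nums2 (m+1) 0) % pvM = _
      rw [ih, Int.emod_add_emod]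
      conv_rhs => rw [Finset.sum_range_succ]

theorem sum_swap (nums1 nums2 : List Int) :
    ∀ n : Nat, ∑ i ∈ Finset.range n, pvG nums1 nums2 i 0 = pvTot nums1 nums2 n n := by
  intro n
  induction n with
  | zero => simp [pvTot]
  | succ n ih =>
      rw [Finset.sum_range_succ, ih, G_eq_sum_D]
      simp only [pvTot]
      conv_rhs => rw [Finset.sum_range_succ]
      have hlast : ∑ m ∈ Finset.range (n+1-n), pvD nums1 nums2 (n : Int) (m+1) 0
          = pvD nums1 nums2 (n : Int) 1 0 := by
        rw [show n+1-n = 1 from by omega, Finset.sum_range_one]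
      have hsplit : ∀ l ∈ Finset.range n,
          ∑ m ∈ Finset.range (n+1-l), pvD nums1 nums2 (l : Int) (m+1) 0
          = ∑ m ∈ Finset.range (n-l), pvD nums1 nums2 (l : Int) (m+1) 0
            + pvD nums1 nums2 (l : Int) ((n-l)+1) 0 := by
        intro l hl
        have : l < n := Finset.mem_range.1 hl
        rw [show n+1-l = (n-l)+1 from by omega, Finset.sum_range_succ]
      rw [Finset.sum_congr rfl hsplit, hlast, Finset.sum_add_distrib]
      conv_lhs => rw [Finset.sum_range_succ]
      have hcong : ∀ l ∈ Finset.range n,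
          pvD nums1 nums2 (l : Int) (n - l + 1) 0 = pvD nums1 nums2 (l : Int) ((n-l)+1) 0 := by
        intro l _; rfl
      rw [Finset.sum_congr rfl hcong, show n - n + 1 = 1 from by omega]
      ring

-- ===== VERDICT (by name: the statement is the Claim_ definition above) =====
theorem lc_2143_spec : Claim_equal_lc_2143 := by
  intro nums1 nums2 _ hpre
  obtain ⟨hne, hlen⟩ := hpre
  have hn : 0 < nums1.length := List.length_pos_iff.mpr hne
  unfold Spec_lc_2143
  -- ----- A's result is pvAnsA (n-1) -----
  have hinit_vals : ∀ x, (pvBumpA (pvBumpA PySem.Dict.empty (-(pvVal nums1 0)) 1) (pvVal nums2 0) 1).getD x 0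
      = pvG nums1 nums2 0 x := by
    intro x
    rw [pvBumpA_getD, pvBumpA_getD, PySem.Dict.getD_empty]
    simp only [pvG]
    ring
  set D1 := pvBumpA (pvBumpA PySem.Dict.empty (-(pvVal nums1 0)) 1) (pvVal nums2 0) 1 with hD1
  have hinit_nodup : D1.keys.Nodup :=
    pvBumpA_nodup _ _ _ (pvBumpA_nodup _ _ _ PySem.Dict.nodup_keys_empty)
  set a0 := D1.getD 0 0 with ha0
  have ha0G : a0 = pvAnsA nums1 nums2 0 := by rw [ha0, hinit_vals 0]; rfl
  set D2 := D1.insert 0 a0 with hD2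
  have hD2vals : ∀ x, D2.getD x 0 = pvG nums1 nums2 0 x := by
    intro x
    rw [hD2, PySem.Dict.getD_insert]
    split_ifs with h
    · rw [h, ha0]; exact hinit_vals 0
    · exact hinit_vals x
  have hD2nodup : D2.keys.Nodup := PySem.Dict.nodup_keys_insert _ _ _ hinit_nodup
  obtain ⟨hA, -, -⟩ := A_loop nums1 nums2 (nums1.length - 1) a0 D2 hD2nodup hD2vals ha0G
  have eA : lc_2143 nums1 nums2 = ((PySem.List.pyRange 1 ((nums1.length : Nat) : Int) 1).foldl
      (fun (st : Int × PySem.Dict Int Int) i =>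
        let ai := (PySem.List.pyGet? nums1 i).getD 0
        let bi := (PySem.List.pyGet? nums2 i).getD 0
        let cur := pvBumpA PySem.Dict.empty (-ai) 1
        let cur := pvBumpA cur bi 1
        let cur := st.2.keys.foldl (fun c p =>
            pvBumpA (pvBumpA c (p - ai) (st.2.getD p 0)) (p + bi) (st.2.getD p 0)) cur
        let c0 := cur.getD 0 0
        let cur := cur.insert 0 c0
        ((st.1 + c0) % (10 ^ 9 + 7), cur)) (a0, D2)).1 := rfl
  have hAval : lc_2143 nums1 nums2 = pvAnsA nums1 nums2 (nums1.length - 1) := by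
    rw [eA, show ((nums1.length : Nat) : Int) = 1 + ((nums1.length - 1 : Nat) : Int) from by omega]
    exact hA
  -- ----- B's result is pvTot n n % pvM -----
  have eB : lc_2143_alt nums1 nums2 = ((PySem.List.pyRange 0 ((nums1.length : Nat) : Int) 1).foldl (fun ans l =>
        ((PySem.List.pyRange l (nums1.length : Int) 1).foldl (fun (st : Int × PySem.Dict Int Int) r =>
            let ar := (PySem.List.pyGet? nums1 r).getD 0
            let br := (PySem.List.pyGet? nums2 r).getD 0
            let ndp := st.2.items.foldl (fun nd (pc : Int × Int) =>
                let k1 := pc.1 - ar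
                let nd := nd.insert k1 (nd.getD k1 0 + pc.2)
                let k2 := pc.1 + br
                nd.insert k2 (nd.getD k2 0 + pc.2)) PySem.Dict.empty
            ((st.1 + ndp.getD 0 0) % (10 ^ 9 + 7), ndp)) (ans, PySem.Dict.empty.insert 0 1)).1) 0) := rfl
  have hBval : lc_2143_alt nums1 nums2 = pvTot nums1 nums2 nums1.length nums1.length % pvM := by
    rw [eB]
    exact B_outer nums1 nums2 nums1.length (le_refl _)
  -- ----- they agree -----
  rw [hAval, hBval, ansA_sum, show nums1.length - 1 + 1 = nums1.length from by omega,
    sum_swap]
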